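-- pv_equiv track=rewrite | github.com/xbchenf/open-ai-learn | openai_translator_helper/ai-translator-helper-langchain/openai-translator-pro/translator/pdf/pdf_parser.py | words_match_cell
-- ===== SOURCE A (Python) =====
-- def words_match_cell(words, start_idx, cell_text):
--     end_idx = start_idx
--     combined_text = ''
--     cell_text_cleaned = cell_text.replace("\n", " ").strip()  # 对单元格文本进行清理，替换换行符为空格
--
--     while end_idx < len(words) and combined_text.strip() != cell_text_cleaned:
--         combined_text += ' ' + words[end_idx]['text']
--         end_idx += 1
--
--     return combined_text.strip() == cell_text_cleaned, end_idx
-- ===== SOURCE B (Python) =====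
-- def words_match_cell(words, start_idx, cell_text):
--     target = cell_text.replace("\n", " ").strip()
--     n = len(words)
--     i = start_idx
--     stripped = ''   # the combined text so far, with outer whitespace removed
--     tws = ''        # the whitespace that trails `stripped` inside the combined text
--     while True:
--         if len(stripped) == len(target) and stripped == target:
--             return True, i
--         if i >= n:
--             return False, i
--         piece = ' ' + words[i]['text']
--         ps = piece.strip()
--         if ps == '':
--             if stripped:
--                 tws += piece
--         elif stripped == '':
--             stripped = ps
--             tws = piece.lstrip()[len(ps):]
--         else:
--             r = piece.rstrip()
--             stripped = stripped + tws + r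
--             tws = piece[len(r):]
--         i += 1
-- ===== Notes on version B (the rewrite author's own statement) =====
-- stated objective: alternative
-- what changed: B keeps the combined text's stripped value and its trailing whitespace incrementally (one string append per word) and compares it to the target only when the lengths are equal, instead of A's re-running strip() over the whole accumulated string and comparing it in full on every iteration.
-- outside the precondition, e.g. on words_match_cell([{'text': 'a'}, {'b': 'c'}], 0, 'a'): A returns (True, 1), B returns (True, 1)
import Mathlib
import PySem

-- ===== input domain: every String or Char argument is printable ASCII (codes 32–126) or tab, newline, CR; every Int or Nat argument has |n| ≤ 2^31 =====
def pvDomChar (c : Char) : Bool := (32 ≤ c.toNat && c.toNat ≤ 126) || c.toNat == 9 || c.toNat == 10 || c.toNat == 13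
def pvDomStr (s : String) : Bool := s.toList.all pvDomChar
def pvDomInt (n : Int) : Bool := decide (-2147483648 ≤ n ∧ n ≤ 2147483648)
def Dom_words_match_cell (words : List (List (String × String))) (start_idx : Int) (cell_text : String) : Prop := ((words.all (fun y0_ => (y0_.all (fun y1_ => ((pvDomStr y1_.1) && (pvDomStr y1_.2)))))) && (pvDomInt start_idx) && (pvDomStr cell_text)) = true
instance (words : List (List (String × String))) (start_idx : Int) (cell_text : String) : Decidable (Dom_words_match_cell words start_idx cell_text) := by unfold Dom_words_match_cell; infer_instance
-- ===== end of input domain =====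

-- B replaces A's per-iteration re-strip and full string comparison by an incrementally
-- maintained stripped accumulator (with its trailing whitespace kept separately) and a
-- length-gated comparison; equivalence of the RETURN value is what is proved.

-- ===== PORT A =====
-- words[i]['text'] : Python dict lookup (first matching key); none = KeyError
def pvTextOf (d : List (String × String)) : Option String :=
  (d.find? (fun p => p.1 == "text")).map (fun p => p.2)

def wmcLoopA (words : List (List (String × String))) (cleaned : String)
    (end_idx : Int) (combined : String) : Bool × Int :=
  if h : end_idx < (words.length : Int) ∧ PySem.Str.strip combined ≠ cleaned then
    match PySem.List.pyGet? words end_idx with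
    | none => (false, end_idx)        -- Python raises IndexError here (outside Pre_)
    | some d =>
      match pvTextOf d with
      | none => (false, end_idx)      -- Python raises KeyError here (outside Pre_)
      | some t => wmcLoopA words cleaned (end_idx + 1) (combined ++ " " ++ t)
  else (PySem.Str.strip combined == cleaned, end_idx)
termination_by ((words.length : Int) - end_idx).toNat
decreasing_by omega

def words_match_cell (words : List (List (String × String))) (start_idx : Int) (cell_text : String) : Bool × Int :=
  wmcLoopA words (PySem.Str.strip (PySem.Str.replace cell_text "\n" " ")) start_idx ""

-- ===== PORT B =====
def wmcLoopB (words : List (List (String × String))) (target : String)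
    (i : Int) (stripped tws : String) : Bool × Int :=
  if PySem.Str.len stripped == PySem.Str.len target && stripped == target then (true, i)
  else if hn : (words.length : Int) ≤ i then (false, i)
  else
    match PySem.List.pyGet? words i with
    | none => (false, i)              -- Python raises IndexError here (outside Pre_)
    | some d =>
      match pvTextOf d with
      | none => (false, i)            -- Python raises KeyError here (outside Pre_)
      | some t =>
        let piece := " " ++ t
        let ps := PySem.Str.strip piece
        if ps == "" then
          wmcLoopB words target (i + 1) stripped (if stripped == "" then tws else tws ++ piece)
        else if stripped == "" then
          wmcLoopB words target (i + 1) ps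
            (PySem.Str.slice (PySem.Str.lstrip piece) (some (PySem.Str.len ps)))
        else
          let r := PySem.Str.rstrip piece
          wmcLoopB words target (i + 1) (stripped ++ tws ++ r)
            (PySem.Str.slice piece (some (PySem.Str.len r)))
termination_by ((words.length : Int) - i).toNat
decreasing_by all_goals omega

def words_match_cell_alt (words : List (List (String × String))) (start_idx : Int) (cell_text : String) : Bool × Int :=
  wmcLoopB words (PySem.Str.strip (PySem.Str.replace cell_text "\n" " ")) start_idx "" ""

-- ===== PRECONDITION & SPEC =====
-- Pre_ admits exactly the inputs where no raising dict access can happen: an empty cleaned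
-- cell text (the loop never runs), or a start index ≥ 0 with every dict from it carrying
-- 'text', or a wrapping start index in [-len, 0) with every dict carrying 'text'; it slightly
-- over-approximates raising (a match can end the scan before a 'text'-less dict is reached).
def Pre_words_match_cell (words : List (List (String × String))) (start_idx : Int) (cell_text : String) : Prop :=
  PySem.Str.strip (PySem.Str.replace cell_text "\n" " ") = "" ∨
  (0 ≤ start_idx ∧ ∀ d ∈ words.drop start_idx.toNat, "text" ∈ d.map Prod.fst) ∨
  (-(words.length : Int) ≤ start_idx ∧ start_idx < 0 ∧ ∀ d ∈ words, "text" ∈ d.map Prod.fst)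
instance (words : List (List (String × String))) (start_idx : Int) (cell_text : String) : Decidable (Pre_words_match_cell words start_idx cell_text) := by unfold Pre_words_match_cell; infer_instance

def pvWitness_words_match_cell : (List (List (String × String))) × Int × String :=
  ([[("text", "ab")], [("text", "cd")]], 0, "ab cd")

def Spec_words_match_cell (words : List (List (String × String))) (start_idx : Int) (cell_text : String) (out : Bool × Int) : Prop := out = words_match_cell_alt words start_idx cell_text
instance (words : List (List (String × String))) (start_idx : Int) (cell_text : String) (out : Bool × Int) : Decidable (Spec_words_match_cell words start_idx cell_text out) := by unfold Spec_words_match_cell; infer_instance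

-- ===== CLAIM (what is proved, stated in full; the proofs are below) =====
def Claim_equal_words_match_cell : Prop := ∀ (words : List (List (String × String))) (start_idx : Int) (cell_text : String), Dom_words_match_cell words start_idx cell_text → Pre_words_match_cell words start_idx cell_text → Spec_words_match_cell words start_idx cell_text (words_match_cell words start_idx cell_text)

-- ===== LEMMAS AND PROOFS =====

theorem pv_lstrip_append (a b : List Char) :
    PySem.Chars.lstrip (a ++ b) =
      if PySem.Chars.lstrip a = [] then PySem.Chars.lstrip b else PySem.Chars.lstrip a ++ b := by
  simp [PySem.Chars.lstrip, List.dropWhile_append, List.isEmpty_iff]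

theorem pv_rstrip_append (a b : List Char) :
    PySem.Chars.rstrip (a ++ b) =
      if PySem.Chars.rstrip b = [] then PySem.Chars.rstrip a else a ++ PySem.Chars.rstrip b := by
  simp only [PySem.Chars.rstrip, List.reverse_append, List.dropWhile_append,
    List.isEmpty_iff, List.reverse_eq_nil_iff]
  split <;> simp

theorem pv_lstrip_nil_iff (x : List Char) :
    PySem.Chars.lstrip x = [] ↔ ∀ c ∈ x, PySem.Chars.isspace c = true := by
  simp [PySem.Chars.lstrip, List.dropWhile_eq_nil_iff]

theorem pv_rstrip_nil_iff (x : List Char) :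
    PySem.Chars.rstrip x = [] ↔ ∀ c ∈ x, PySem.Chars.isspace c = true := by
  simp [PySem.Chars.rstrip, List.dropWhile_eq_nil_iff]

theorem pv_strip_nil (x : List Char) (h : PySem.Chars.strip x = []) :
    PySem.Chars.lstrip x = [] := by
  have h1 : ∀ c ∈ PySem.Chars.lstrip x, PySem.Chars.isspace c = true :=
    (pv_rstrip_nil_iff _).1 h
  cases hx : PySem.Chars.lstrip x with
  | nil => rfl
  | cons c l =>
    exfalso
    have hc : PySem.Chars.isspace c = true := h1 c (by rw [hx]; exact List.mem_cons_self)
    have := List.head_dropWhile_not (p := PySem.Chars.isspace) (l := x)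
    rw [PySem.Chars.lstrip] at hx
    simp [hx] at this
    simp [this] at hc

theorem pv_rstrip_take (x : List Char) :
    PySem.Chars.rstrip x ++ x.drop (PySem.Chars.rstrip x).length = x := by
  have hpref : PySem.Chars.rstrip x <+: x := by
    have := List.dropWhile_suffix (l := x.reverse) (PySem.Chars.isspace)
    rw [PySem.Chars.rstrip]
    exact List.reverse_suffix.mp (by simpa using this)
  obtain ⟨r, hr⟩ := hpref
  conv_rhs => rw [← hr]
  congr 1
  have := congrArg (List.drop (PySem.Chars.rstrip x).length) hr
  simpa using this.symm

theorem pv_gate (s t : String) :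
    (PySem.Str.len s == PySem.Str.len t && s == t) = (s == t) := by
  by_cases h : s = t <;> simp [h]

-- invariant updates for one appended piece, at the List Char level
theorem pv_strip_empty : PySem.Chars.strip ([] : List Char) = [] := by
  simp [PySem.Chars.strip, PySem.Chars.lstrip, PySem.Chars.rstrip]

theorem pv_upd_ws (C P S W : List Char) (hS : S = PySem.Chars.strip C)
    (hSW : S ++ W = PySem.Chars.lstrip C) (hP : PySem.Chars.strip P = []) :
    S = PySem.Chars.strip (C ++ P) ∧
      S ++ (if S = [] then W else W ++ P) = PySem.Chars.lstrip (C ++ P) := by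
  have hlp : PySem.Chars.lstrip P = [] := pv_strip_nil P hP
  have hrp : PySem.Chars.rstrip P = [] :=
    (pv_rstrip_nil_iff P).2 ((pv_lstrip_nil_iff P).1 hlp)
  by_cases hSnil : S = []
  · have hC : PySem.Chars.lstrip C = [] := pv_strip_nil C (hSnil ▸ hS).symm
    have hW : W = [] := by simpa [hSnil, hC] using hSW
    have hl : PySem.Chars.lstrip (C ++ P) = [] := by
      rw [pv_lstrip_append, if_pos hC]; exact hlp
    refine ⟨?_, ?_⟩
    · rw [PySem.Chars.strip, hl]; simp [hSnil, PySem.Chars.rstrip]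
    · simp [hSnil, hW, hl]
  · have hlC : PySem.Chars.lstrip C ≠ [] := by
      intro h
      exact hSnil (by rw [hS, PySem.Chars.strip, h]; simp [PySem.Chars.rstrip])
    have hl : PySem.Chars.lstrip (C ++ P) = PySem.Chars.lstrip C ++ P := by
      rw [pv_lstrip_append, if_neg hlC]
    refine ⟨?_, ?_⟩
    · rw [PySem.Chars.strip, hl, pv_rstrip_append, if_pos hrp, ← PySem.Chars.strip, ← hS]
    · rw [if_neg hSnil, hl, ← hSW]; simp

theorem pv_upd_first (C P : List Char) (hC : PySem.Chars.strip C = []) :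
    PySem.Chars.strip P = PySem.Chars.strip (C ++ P) ∧
      PySem.Chars.strip P ++ (PySem.Chars.lstrip P).drop (PySem.Chars.strip P).length =
        PySem.Chars.lstrip (C ++ P) := by
  have hlC : PySem.Chars.lstrip C = [] := pv_strip_nil C hC
  have hl : PySem.Chars.lstrip (C ++ P) = PySem.Chars.lstrip P := by
    rw [pv_lstrip_append, if_pos hlC]
  refine ⟨by unfold PySem.Chars.strip; rw [hl], ?_⟩
  rw [hl, PySem.Chars.strip]
  exact pv_rstrip_take (PySem.Chars.lstrip P)

theorem pv_upd_mid (C P S W : List Char) (hS : S = PySem.Chars.strip C)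
    (hSW : S ++ W = PySem.Chars.lstrip C) (hP : PySem.Chars.strip P ≠ [])
    (hSnil : S ≠ []) :
    S ++ W ++ PySem.Chars.rstrip P = PySem.Chars.strip (C ++ P) ∧
      (S ++ W ++ PySem.Chars.rstrip P) ++ P.drop (PySem.Chars.rstrip P).length =
        PySem.Chars.lstrip (C ++ P) := by
  have hrp : PySem.Chars.rstrip P ≠ [] := by
    intro h
    have hws := (pv_rstrip_nil_iff P).1 h
    have hlp : PySem.Chars.lstrip P = [] := (pv_lstrip_nil_iff P).2 hws
    exact hP (by unfold PySem.Chars.strip; rw [hlp]; simp [PySem.Chars.rstrip])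
  have hlC : PySem.Chars.lstrip C ≠ [] := by
    intro h; rw [h] at hSW; simp at hSW; exact hSnil hSW.1
  have hl : PySem.Chars.lstrip (C ++ P) = PySem.Chars.lstrip C ++ P := by
    rw [pv_lstrip_append, if_neg hlC]
  refine ⟨?_, ?_⟩
  · unfold PySem.Chars.strip; rw [hl, pv_rstrip_append, if_neg hrp, ← hSW]
  · rw [hl, ← hSW]
    simp only [List.append_assoc]
    rw [pv_rstrip_take P]

theorem pv_loop_eq (words : List (List (String × String))) (cleaned : String)
    (k : Nat) :
    ∀ (i : Int), ((words.length : Int) - i).toNat ≤ k →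
    ∀ (c stripped tws : String),
      stripped.toList = PySem.Chars.strip c.toList →
      stripped.toList ++ tws.toList = PySem.Chars.lstrip c.toList →
      wmcLoopA words cleaned i c = wmcLoopB words cleaned i stripped tws := by
  induction k with
  | zero =>
    intro i hk c stripped tws h1 h2
    have hstr : stripped = PySem.Str.strip c :=
      String.toList_inj.mp (by rw [h1, PySem.Str.toList_strip])
    subst hstr
    have hge : ¬ i < (words.length : Int) := by omega
    rw [wmcLoopA, wmcLoopB, pv_gate]
    rw [dif_neg (fun h => hge h.1)]
    by_cases hm : PySem.Str.strip c = cleaned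
    · simp [hm]
    · have hle : (words.length : Int) ≤ i := by omega
      simp [hm, hle]
  | succ k ih =>
    intro i hk c stripped tws h1 h2
    have hstr : stripped = PySem.Str.strip c :=
      String.toList_inj.mp (by rw [h1, PySem.Str.toList_strip])
    subst hstr
    by_cases hm : PySem.Str.strip c = cleaned
    · rw [wmcLoopA, wmcLoopB, pv_gate]
      rw [dif_neg (fun h => h.2 hm)]
      simp [hm]
    · by_cases hlt : i < (words.length : Int)
      · have hne0 : (PySem.Str.strip c == cleaned) = false := by simp [hm]
        have hnle0 : ¬ ((words.length : Int) ≤ i) := by omega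
        cases hd : PySem.List.pyGet? words i with
        | none =>
          rw [wmcLoopA, wmcLoopB, pv_gate]
          rw [dif_pos ⟨hlt, hm⟩, hne0]
          rw [if_neg (by simp : ¬ (false = true))]
          rw [dif_neg hnle0, hd]
        | some d =>
          cases ht : pvTextOf d with
          | none =>
            rw [wmcLoopA, wmcLoopB, pv_gate]
            rw [dif_pos ⟨hlt, hm⟩, hne0]
            rw [if_neg (by simp : ¬ (false = true))]
            rw [dif_neg hnle0, hd]
            simp only [ht]
          | some t =>
            have hne : (PySem.Str.strip c == cleaned) = false := by simp [hm]
            have hnle : ¬ ((words.length : Int) ≤ i) := by omega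
            rw [wmcLoopA, wmcLoopB, pv_gate]
            rw [dif_pos ⟨hlt, hm⟩, hne]
            rw [if_neg (by simp : ¬ (false = true))]
            rw [dif_neg hnle, hd]
            simp only [ht, beq_iff_eq]
            have hslice : ∀ (s : String) (n : Nat),
                (PySem.Str.slice s (some (n : Int))).toList = s.toList.drop n := by
              intro s n
              rw [PySem.Str.toList_slice, PySem.Chars.slice_eq_listSlice,
                PySem.List.slice_from _ (Int.natCast_nonneg n)]
              simp
            have htl : (c ++ " " ++ t).toList = c.toList ++ ' ' :: t.toList := by simp
            by_cases hps : PySem.Str.strip (" " ++ t) = ""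
            · have hP : PySem.Chars.strip (' ' :: t.toList) = [] := by
                have := congrArg String.toList hps
                rw [PySem.Str.toList_strip] at this
                simpa using this
              obtain ⟨hS', hW'⟩ :=
                pv_upd_ws c.toList (' ' :: t.toList) _ _ h1 h2 hP
              rw [if_pos hps]
              by_cases hse : PySem.Str.strip c = ""
              · have hSnil : (PySem.Str.strip c).toList = [] := by
                  rw [hse]; rfl
                rw [if_pos hse]
                refine ih (i + 1) (by omega) (c ++ " " ++ t) _ _ ?_ ?_
                · rw [htl]; exact hS'
                · rw [htl]; rw [if_pos hSnil] at hW'; exact hW'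
              · have hSnil : ¬ (PySem.Str.strip c).toList = [] := by
                  intro h; exact hse (String.toList_inj.mp (by simpa using h))
                rw [if_neg hse]
                refine ih (i + 1) (by omega) (c ++ " " ++ t) _ _ ?_ ?_
                · rw [htl]; exact hS'
                · rw [htl]; rw [if_neg hSnil] at hW'
                  simpa using hW'
            · have hP : ¬ PySem.Chars.strip (' ' :: t.toList) = [] := by
                intro h
                apply hps
                apply String.toList_inj.mp
                rw [PySem.Str.toList_strip]
                simpa using h
              rw [if_neg hps]
              by_cases hse : PySem.Str.strip c = ""
              · have hC : PySem.Chars.strip c.toList = [] := by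
                  rw [← h1, hse]; rfl
                obtain ⟨hS', hW'⟩ := pv_upd_first c.toList (' ' :: t.toList) hC
                rw [if_pos hse]
                refine ih (i + 1) (by omega) (c ++ " " ++ t) _ _ ?_ ?_
                · rw [htl, PySem.Str.toList_strip]
                  simpa using hS'
                · rw [htl, PySem.Str.len_eq, hslice, PySem.Str.toList_strip, PySem.Str.toList_lstrip]
                  simpa using hW'
              · have hSnil : (PySem.Str.strip c).toList ≠ [] := by
                  intro h; exact hse (String.toList_inj.mp (by simpa using h))
                obtain ⟨hS', hW'⟩ :=
                  pv_upd_mid c.toList (' ' :: t.toList) _ _ h1 h2 hP hSnil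
                rw [if_neg hse]
                refine ih (i + 1) (by omega) (c ++ " " ++ t) _ _ ?_ ?_
                · rw [htl]
                  simpa [PySem.Str.toList_rstrip] using hS'
                · rw [htl, PySem.Str.len_eq, hslice, PySem.Str.toList_rstrip]
                  simpa [PySem.Str.toList_rstrip] using hW'
      · have hge : ¬ i < (words.length : Int) := hlt
        rw [wmcLoopA, wmcLoopB, pv_gate]
        rw [dif_neg (fun h => hge h.1)]
        have hle : (words.length : Int) ≤ i := by omega
        simp [hm, hle]

theorem words_match_cell_spec : Claim_equal_words_match_cell := by
  intro words start_idx cell_text hdom hpre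
  unfold Spec_words_match_cell
  rw [words_match_cell, words_match_cell_alt]
  exact pv_loop_eq words _ ((words.length : Int) - start_idx).toNat start_idx
    le_rfl "" "" ""
    (by simp [pv_strip_empty])
    (by simp [PySem.Chars.lstrip])
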